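-- pv_equiv track=rewrite | github.com/OnMyWave/Algorithm | Programmers/5번.py | solution
-- ===== SOURCE A (Python) =====
-- def convert(n):
--     T = "01"
--     q, r = divmod(n,2)
--     if q == 0:
--         return T[r]
--     else:
--         return convert(q) + T[r]
--
-- def solution(n):
--     answer = 0
--     binary_num = convert(n)
--     k = 0
--     for string in binary_num:
--         if string == '1':
--             k+=1
--     for i in range(0,n-1):
--         binary_i = convert(i)
--         count = 0
--         for j in binary_i:
--             if j == '1':
--                 count+=1
--         if count == k:
--             answer+=1
--     return answer
-- ===== SOURCE B (Python) =====
-- def solution(n):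
--     # k = popcount(n)
--     k = 0
--     m = n
--     while m > 0:
--         k += m & 1
--         m >>= 1
--     # g(m, k) = how many integers in [0, m) have exactly k set bits,
--     # by splitting on the lowest bit: evens 2j (j < (m+1)//2, same popcount)
--     # and odds 2j+1 (j < m//2, popcount one less).  Memoised -> O(log^2 n).
--     memo = {}
--     def g(m, k):
--         if m <= 0 or k < 0:
--             return 0
--         if m == 1:
--             return 1 if k == 0 else 0
--         key = (m, k)
--         if key not in memo:
--             memo[key] = g((m + 1) // 2, k) + g(m // 2, k - 1)
--         return memo[key]
--     return g(n - 1, k)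
-- ===== Notes on version B (the rewrite author's own statement) =====
-- stated objective: faster
-- what changed: Replaced the scan over all i < n-1 (building each i's binary string and counting '1's) by a memoised halving recurrence g(m,k) counting integers below m with exactly k set bits directly.
import Mathlib
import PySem

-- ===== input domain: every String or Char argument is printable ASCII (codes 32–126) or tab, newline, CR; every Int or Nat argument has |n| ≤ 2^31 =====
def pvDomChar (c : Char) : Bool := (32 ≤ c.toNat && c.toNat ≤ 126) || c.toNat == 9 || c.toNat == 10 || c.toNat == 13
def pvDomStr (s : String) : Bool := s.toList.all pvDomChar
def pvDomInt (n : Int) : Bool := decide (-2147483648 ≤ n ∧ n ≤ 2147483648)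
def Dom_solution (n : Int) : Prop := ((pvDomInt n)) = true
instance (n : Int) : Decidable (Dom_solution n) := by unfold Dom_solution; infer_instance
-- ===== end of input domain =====

-- B replaces A's scan over all i < n-1 (re-building each i's binary string) by a
-- memoised halving recurrence counting integers below m with k set bits directly.

-- ===== PORT A =====
-- Python strings are represented as List Char (PySem.Chars convention).
-- convert: q, r = divmod(n, 2); T[r] with T = "01"; exact for n ≥ 0 (Pre_solution):
-- Python's convert recurses forever (RecursionError) on negative input.
def convertA (n : Nat) : List Char :=
  if _h : n / 2 = 0 then [if n % 2 = 1 then '1' else '0']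
  else convertA (n / 2) ++ [if n % 2 = 1 then '1' else '0']
termination_by n
decreasing_by omega

def solution (n : Int) : Int :=
  let binary_num := convertA n.toNat
  let k := binary_num.foldl (fun k c => if c == '1' then k + 1 else k) (0 : Int)
  (PySem.List.pyRange 0 (n - 1) 1).foldl
    (fun answer i =>
      let binary_i := convertA i.toNat
      let count := binary_i.foldl (fun c j => if j == '1' then c + 1 else c) (0 : Int)
      if count == k then answer + 1 else answer) 0

-- ===== PORT B =====
-- while m > 0: k += m & 1; m >>= 1   (for m > 0, m & 1 = m % 2 and m >> 1 = m / 2)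
def pcLoop (m k : Int) : Int :=
  if _h : m > 0 then pcLoop (m / 2) (k + m % 2) else k
termination_by m.toNat
decreasing_by omega

-- Source B's g; the Python memo dict only caches results, the recurrence is identical
def gB (m k : Int) : Int :=
  if m ≤ 0 ∨ k < 0 then 0
  else if m = 1 then (if k = 0 then 1 else 0)
  else gB ((m + 1) / 2) k + gB (m / 2) (k - 1)
termination_by m.toNat
decreasing_by all_goals omega

def solution_alt (n : Int) : Int := gB (n - 1) (pcLoop n 0)

-- ===== PRECONDITION & SPEC =====
-- Pre_ excludes negative n, where Python's A raises RecursionError (convert never terminates).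
def Pre_solution (n : Int) : Prop := 0 ≤ n
instance (n : Int) : Decidable (Pre_solution n) := by unfold Pre_solution; infer_instance
def pvWitness_solution : Int := 6

def Spec_solution (n : Int) (out : Int) : Prop := out = solution_alt n
instance (n : Int) (out : Int) : Decidable (Spec_solution n out) := by unfold Spec_solution; infer_instance

-- ===== CLAIM (what is proved, stated in full; the proofs are below) =====
def Claim_equal_solution : Prop := ∀ (n : Int), Dom_solution n → Pre_solution n → Spec_solution n (solution n)

-- ===== LEMMAS AND PROOFS =====

-- mathematical popcount, the quantity both programs' inner loops compute
def pc (n : Nat) : Nat :=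
  if n = 0 then 0 else pc (n / 2) + n % 2
termination_by n
decreasing_by omega

-- number of i < m with popcount k: both programs compute cnt (n-1).toNat (pc n.toNat)
def cnt (m : Nat) (k : Int) : Int :=
  (((List.range m).countP (fun i => decide ((pc i : Int) = k))) : Int)


lemma ones_convertA (n : Nat) :
    (((convertA n).countP (fun c => c == '1')) : Int) = (pc n : Int) := by
  fun_induction convertA n with
  | case1 n h =>
    rw [pc]
    rcases Nat.lt_or_ge n 1 with h1 | h1
    · have hn : n = 0 := by omega
      subst hn; simp
    · have hn : n = 1 := by omega
      subst hn; simp [pc]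
  | case2 n h ih =>
    rw [pc]
    have hn : n ≠ 0 := by omega
    rw [List.countP_append]
    rcases Nat.mod_two_eq_zero_or_one n with h2 | h2 <;>
      · simp only [hn, if_false, h2, Nat.zero_ne_one]
        simp
        omega


lemma pcLoop_eq (m k : Int) : pcLoop m k = k + (pc m.toNat : Int) := by
  fun_induction pcLoop m k with
  | case1 m k h ih =>
    rw [ih]
    conv_rhs => rw [pc]
    have h0 : m.toNat ≠ 0 := by omega
    have h1 : (m / 2).toNat = m.toNat / 2 := by omega
    simp only [h0, if_false, h1]
    push_cast
    omega
  | case2 m k h =>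
    have h0 : m.toNat = 0 := by omega
    rw [h0, pc]; simp


lemma cnt_succ (m : Nat) (k : Int) :
    cnt (m + 1) k = cnt m k + (if (pc m : Int) = k then 1 else 0) := by
  simp [cnt, List.range_succ, List.countP_append]

lemma pc_two_mul (j : Nat) : pc (2 * j) = pc j := by
  rcases Nat.eq_zero_or_pos j with h | h
  · simp [h]
  · rw [pc]; simp [Nat.mul_mod_right]; omega

lemma pc_two_mul_add_one (j : Nat) : pc (2 * j + 1) = pc j + 1 := by
  rw [pc]
  have h1 : (2 * j + 1) / 2 = j := by omega
  have h2 : (2 * j + 1) % 2 = 1 := by omega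
  simp [h1, h2]

lemma cnt_split (m : Nat) (k : Int) :
    cnt m k = cnt ((m + 1) / 2) k + cnt (m / 2) (k - 1) := by
  induction m generalizing k with
  | zero => simp [cnt]
  | succ m ih =>
    rcases Nat.even_or_odd m with ⟨j, hj⟩ | ⟨j, hj⟩
    · have hj' : m = 2 * j := by omega
      subst hj'
      have e1 : (2 * j + 1 + 1) / 2 = j + 1 := by omega
      have e2 : (2 * j + 1) / 2 = j := by omega
      have e3 : (2 * j) / 2 = j := by omega
      rw [cnt_succ, ih]
      simp only [e1, e2, e3, cnt_succ, pc_two_mul]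
      ring
    · subst hj
      have e0 : (2 * j + 1 + 1 + 1) / 2 = j + 1 := by omega
      have e1 : (2 * j + 1 + 1) / 2 = j + 1 := by omega
      have e2 : (2 * j + 1) / 2 = j := by omega
      rw [cnt_succ, ih]
      simp only [e0, e1, e2, cnt_succ, pc_two_mul_add_one]
      push_cast
      split_ifs <;> omega

lemma cnt_one (k : Int) : cnt 1 k = if k = 0 then 1 else 0 := by
  have h0 : pc 0 = 0 := by rw [pc]; simp
  simp [cnt, h0, eq_comm]

lemma cnt_neg (m : Nat) (k : Int) (hk : k < 0) : cnt m k = 0 := by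
  simp only [cnt]
  have : (List.range m).countP (fun i => decide ((pc i : Int) = k)) = 0 := by
    rw [List.countP_eq_zero]
    intro i _
    simp only [decide_eq_true_eq]
    intro h; omega
  rw [this]; rfl

lemma gB_eq (m : Nat) (k : Int) : gB (m : Int) k = cnt m k := by
  induction m using Nat.strong_induction_on generalizing k with
  | _ m ih =>
    by_cases hk : k < 0
    · rw [gB, if_pos (Or.inr hk), cnt_neg m k hk]
    · rcases m with _ | _ | m
      · rw [gB]; simp [cnt]
      · rw [gB]
        have h1 : ¬(((1:Nat):Int) ≤ 0 ∨ k < 0) := by omega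
        rw [if_neg h1, if_pos (by norm_num), cnt_one]
      · have e2 : m + 1 + 1 = m + 2 := by omega
        rw [e2, gB]
        have h1 : ¬(((m + 2 : Nat):Int) ≤ 0 ∨ k < 0) := by push_cast; omega
        have h2 : ((m + 2 : Nat):Int) ≠ 1 := by push_cast; omega
        rw [if_neg h1, if_neg h2]
        have c1 : (((m + 2 : Nat):Int) + 1) / 2 = (((m + 3) / 2 : Nat) : Int) := by omega
        have c2 : ((m + 2 : Nat):Int) / 2 = (((m + 2) / 2 : Nat) : Int) := by omega
        rw [c1, c2, ih ((m + 3) / 2) (by omega), ih ((m + 2) / 2) (by omega)]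
        have := cnt_split (m + 2) k
        have e : (m + 2 + 1) / 2 = (m + 3) / 2 := by omega
        rw [e] at this
        omega

lemma gB_eq' (m k : Int) : gB m k = cnt m.toNat k := by
  by_cases h : m ≤ 0
  · rw [gB, if_pos (Or.inl h)]
    have : m.toNat = 0 := by omega
    rw [this]; simp [cnt]
  · have : m = ((m.toNat : Nat) : Int) := by omega
    conv_lhs => rw [this, gB_eq]


lemma solution_eq_alt (n : Int) (_h : 0 ≤ n) : solution n = solution_alt n := by
  simp only [solution, solution_alt, PySem.List.foldl_count_if, PySem.List.pyRange_one,
    zero_add, sub_zero, ones_convertA, pcLoop_eq, List.foldl_map, Int.toNat_natCast,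
    ]
  rw [gB_eq']
  simp only [beq_iff_eq, Nat.cast_inj]
  rw [PySem.List.foldl_ite_eq_foldl_filter (p := fun y : Nat => pc y = pc n.toNat) (f := fun (acc : Int) (_ : Nat) => acc + 1)]
  simp only [PySem.List.foldl_add]
  simp [cnt, List.countP_eq_length_filter, Nat.cast_inj]


-- ===== VERDICT (by name: the statement is the Claim_ definition above) =====
theorem solution_spec : Claim_equal_solution := by
  intro n _ hpre
  unfold Spec_solution
  exact solution_eq_alt n hpre
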